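-- pv_equiv track=rewrite | github.com/dranzer-17/HackOverflow | backend/cold_mail/email_finder.py | _filter_emails
-- ===== SOURCE A (Python) =====
-- from typing import List, Set
--
-- def _filter_emails(emails: List[str]) -> List[str]:
--     """Filter and prioritize email addresses"""
--     filtered: List[str] = []
--     seen: Set[str] = set()
--
--     skip_patterns = [
--         "example.com",
--         "test.com",
--         "domain.com",
--         "email.com",
--         "noreply",
--         "no-reply",
--         "donotreply",
--         "privacy",
--         "support@",
--         "help@",
--         "webmaster@",
--         "postmaster@",
--         "abuse@",
--         "security@",
--         "legal@",
--         "dmca@",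
--     ]
--
--     priority_patterns = [
--         "contact@",
--         "hello@",
--         "info@",
--         "careers@",
--         "jobs@",
--         "hr@",
--         "recruiting@",
--         "talent@",
--         "hiring@",
--         "apply@",
--     ]
--
--     priority_emails: List[str] = []
--     regular_emails: List[str] = []
--
--     for email in emails:
--         email_lower = email.lower()
--
--         if any(pattern in email_lower for pattern in skip_patterns):
--             continue
--
--         if email_lower in seen:
--             continue
--
--         seen.add(email_lower)
--
--         if any(pattern in email_lower for pattern in priority_patterns):
--             priority_emails.append(email)
--         else:
--             regular_emails.append(email)
--
--     return priority_emails + regular_emails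
-- ===== SOURCE B (Python) =====
-- from typing import List
--
-- _SKIP = [
--     "example.com", "test.com", "domain.com", "email.com",
--     "noreply", "no-reply", "donotreply", "privacy",
--     "support@", "help@", "webmaster@", "postmaster@",
--     "abuse@", "security@", "legal@", "dmca@",
-- ]
--
-- _PRIORITY = [
--     "contact@", "hello@", "info@", "careers@", "jobs@",
--     "hr@", "recruiting@", "talent@", "hiring@", "apply@",
-- ]
--
--
-- def _filter_emails(emails: List[str]) -> List[str]:
--     """Filter and prioritize email addresses (filter + dedup, then one stable sort)."""
--     deduped: List[str] = []
--     seen = set()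
--     for email in emails:
--         el = email.lower()
--         if el in seen or any(p in el for p in _SKIP):
--             continue
--         seen.add(el)
--         deduped.append(email)
--     # stable sort: priority emails (key False) first, regulars (key True) after,
--     # each group keeping original order
--     return sorted(deduped, key=lambda e: not any(p in e.lower() for p in _PRIORITY))
-- ===== Notes on version B (the rewrite author's own statement) =====
-- stated objective: alternative
-- what changed: A's single loop that partitions kept emails into two append-buckets is replaced by a filter+dedup pass building one list followed by one stable sort on the boolean key 'not priority', whose stability reproduces A's ordering; B also checks the seen-set before the pattern scan, so duplicates skip the O(k) substring scan.
import Mathlib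
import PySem

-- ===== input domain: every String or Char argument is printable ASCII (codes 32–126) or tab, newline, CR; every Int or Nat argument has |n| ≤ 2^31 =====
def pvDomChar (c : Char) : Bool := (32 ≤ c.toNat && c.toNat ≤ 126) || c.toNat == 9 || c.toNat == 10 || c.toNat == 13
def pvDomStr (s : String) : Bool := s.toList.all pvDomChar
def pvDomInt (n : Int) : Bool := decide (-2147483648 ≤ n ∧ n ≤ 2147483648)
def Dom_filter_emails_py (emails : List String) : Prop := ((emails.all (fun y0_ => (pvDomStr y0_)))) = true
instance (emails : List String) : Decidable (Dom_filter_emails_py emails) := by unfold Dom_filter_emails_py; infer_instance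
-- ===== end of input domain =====

-- B replaces A's two append-buckets by filter-then-one-stable-sort on a boolean priority key (objective: alternative decomposition, similar cost).


-- shared module-level pattern constants and the two 'any(pattern in el …)' checks
def pvSkipPatterns : List String :=
  ["example.com", "test.com", "domain.com", "email.com",
   "noreply", "no-reply", "donotreply", "privacy",
   "support@", "help@", "webmaster@", "postmaster@",
   "abuse@", "security@", "legal@", "dmca@"]

def pvPriorityPatterns : List String :=
  ["contact@", "hello@", "info@", "careers@", "jobs@",
   "hr@", "recruiting@", "talent@", "hiring@", "apply@"]

def pvSkipB (el : String) : Bool := pvSkipPatterns.any (fun p => PySem.Str.isIn p el)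
def pvPrioB (el : String) : Bool := pvPriorityPatterns.any (fun p => PySem.Str.isIn p el)

-- ===== PORT A =====
-- loop body: skip-pattern check, seen check, then append to the priority or regular bucket
def pvStepA (st : PySem.Set String × List String × List String) (email : String) :
    PySem.Set String × List String × List String :=
  let el := PySem.Str.lower email
  if pvSkipB el then st
  else if st.1.contains el then st
  else
    let seen := PySem.Set.add st.1 el
    if pvPrioB el then (seen, st.2.1 ++ [email], st.2.2)
    else (seen, st.2.1, st.2.2 ++ [email])

def filter_emails_py (emails : List String) : List String :=
  let res := emails.foldl pvStepA (PySem.Set.empty, [], [])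
  res.2.1 ++ res.2.2

-- ===== PORT B =====
-- loop body: dedup + skip filter into ONE list; then one stable sort on the
-- boolean key 'not priority' (False = priority first), as in Source B
def pvStepB (st : PySem.Set String × List String) (email : String) :
    PySem.Set String × List String :=
  let el := PySem.Str.lower email
  if st.1.contains el || pvSkipB el then st
  else (PySem.Set.add st.1 el, st.2 ++ [email])

def filter_emails_py_alt (emails : List String) : List String :=
  let res := emails.foldl pvStepB (PySem.Set.empty, [])
  PySem.List.sorted res.2 (fun e => !pvPrioB (PySem.Str.lower e)) false

-- ===== PRECONDITION & SPEC =====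
def Spec_filter_emails_py (emails : List String) (out : List String) : Prop := out = filter_emails_py_alt emails
instance (emails : List String) (out : List String) : Decidable (Spec_filter_emails_py emails out) := by unfold Spec_filter_emails_py; infer_instance

-- ===== CLAIM (what is proved, stated in full; the proofs are below) =====
def Claim_equal_filter_emails_py : Prop := ∀ (emails : List String), Dom_filter_emails_py emails → Spec_filter_emails_py emails (filter_emails_py emails)

-- ===== LEMMAS AND PROOFS =====

-- the priority test applied to an original (not yet lowercased) email
def pvPrio (e : String) : Bool := pvPrioB (PySem.Str.lower e)

-- one A-step on a partitioned state = filters of one B-step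
theorem pv_step_eq (st : PySem.Set String × List String) (e : String) :
    pvStepA (st.1, st.2.filter (fun x => pvPrio x), st.2.filter (fun x => !pvPrio x)) e
      = ((pvStepB st e).1,
         (pvStepB st e).2.filter (fun x => pvPrio x),
         (pvStepB st e).2.filter (fun x => !pvPrio x)) := by
  obtain ⟨seen, d⟩ := st
  unfold pvStepA pvStepB
  by_cases hskip : pvSkipB (PySem.Str.lower e) = true
  · by_cases hseen : PySem.Str.lower e ∈ seen
    · simp [hskip, hseen]
    · simp [hskip, hseen]
  · by_cases hseen : PySem.Str.lower e ∈ seen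
    · simp [hskip, hseen]
    · by_cases hpri : pvPrioB (PySem.Str.lower e) = true
      · simp [hskip, hseen, hpri, pvPrio]
      · simp [hskip, hseen, hpri, pvPrio]

-- A's whole fold on a partitioned state = filters of B's whole fold
theorem pv_loop (es : List String) :
    ∀ (st : PySem.Set String × List String),
      es.foldl pvStepA (st.1, st.2.filter (fun x => pvPrio x), st.2.filter (fun x => !pvPrio x))
        = ((es.foldl pvStepB st).1,
           (es.foldl pvStepB st).2.filter (fun x => pvPrio x),
           (es.foldl pvStepB st).2.filter (fun x => !pvPrio x)) := by
  induction es with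
  | nil => intro st; simp
  | cons e es ih =>
    intro st
    rw [List.foldl_cons, List.foldl_cons, pv_step_eq st e]
    exact ih (pvStepB st e)

-- insertion with before a b = ((!pvPrio a) < (!pvPrio b)): a priority element
-- goes right before the first regular one (stability inside each group)
theorem pv_insert_prio (x : String) (hx : pvPrio x = true) :
    ∀ (p r : List String), (∀ y ∈ p, pvPrio y = true) → (∀ y ∈ r, pvPrio y = false) →
      PySem.List.insertBy (fun a b => decide ((!pvPrio a) < (!pvPrio b))) x (p ++ r)
        = (p ++ [x]) ++ r := by
  intro p
  induction p with
  | nil =>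
    intro r _ hr
    cases r with
    | nil => simp [PySem.List.insertBy]
    | cons y ys =>
      have : pvPrio y = false := hr y (by simp)
      simp [PySem.List.insertBy, this, hx]
  | cons z p ih =>
    intro r hp hr
    have hz : pvPrio z = true := hp z (by simp)
    simpa [PySem.List.insertBy, hz, hx] using ih r (fun y hy => hp y (by simp [hy])) hr

-- a regular element is appended at the very end
theorem pv_insert_reg (x : String) (hx : pvPrio x = false) (ys : List String) :
    PySem.List.insertBy (fun a b => decide ((!pvPrio a) < (!pvPrio b))) x ys = ys ++ [x] := by
  apply PySem.List.insertBy_of_forall_not_before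
  intro y _
  simp [hx]

-- the stable insertion sort on the two-valued key is exactly partition-by-appending
theorem pv_sort_partition :
    ∀ (d p r : List String), (∀ y ∈ p, pvPrio y = true) → (∀ y ∈ r, pvPrio y = false) →
      d.foldl (fun acc x => PySem.List.insertBy (fun a b => decide ((!pvPrio a) < (!pvPrio b))) x acc) (p ++ r)
        = (p ++ d.filter (fun x => pvPrio x)) ++ (r ++ d.filter (fun x => !pvPrio x)) := by
  intro d
  induction d with
  | nil => intro p r _ _; simp
  | cons x d ih =>
    intro p r hp hr
    by_cases hx : pvPrio x = true
    · have hins := pv_insert_prio x hx p r hp hr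
      have hp' : ∀ y ∈ p ++ [x], pvPrio y = true := by
        intro y hy
        rcases List.mem_append.1 hy with h | h
        · exact hp y h
        · simp at h; simpa [h] using hx
      rw [List.foldl_cons, hins, ih (p ++ [x]) r hp' hr]
      simp [hx]
    · have hx' : pvPrio x = false := by simpa using hx
      have hr' : ∀ y ∈ r ++ [x], pvPrio y = false := by
        intro y hy
        rcases List.mem_append.1 hy with h | h
        · exact hr y h
        · simp at h; simpa [h] using hx'
      rw [List.foldl_cons, pv_insert_reg x hx' (p ++ r), List.append_assoc p r [x]]
      rw [ih p (r ++ [x]) hp hr']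
      simp [hx']

-- ===== VERDICT (by name: the statement is the Claim_ definition above) =====
theorem filter_emails_py_spec : Claim_equal_filter_emails_py := by
  intro emails _
  unfold Spec_filter_emails_py filter_emails_py filter_emails_py_alt
  have hloop := pv_loop emails (PySem.Set.empty, [])
  simp only [List.filter_nil] at hloop
  rw [hloop, PySem.List.sorted_eq_foldl_insertBy]
  have hsort := pv_sort_partition (emails.foldl pvStepB (PySem.Set.empty, [])).2 [] []
    (by simp) (by simp)
  simp only [List.nil_append] at hsort
  simp only [pvPrio] at hsort ⊢
  exact hsort.symm
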